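-- pv_equiv track=rewrite | github.com/leggedrobotics/terra-baselines | utils/ppo2.py | convert_to_string_agent_state
-- ===== SOURCE A (Python) =====
-- def convert_to_string_agent_state(fixed_structure):
--     result_string_pos = ''
--     result_string_base = ''
--     result_string_cabin = ''
--     result_string_extension = ''
--     result_string_loaded = ''
--     for i in range(len(fixed_structure[0][0])):
--         pos_basex = fixed_structure[0][0][i][0][0]
--         pos_basey = fixed_structure[0][0][i][0][1]
--         angle_base = fixed_structure[0][0][i][0][2]
--         angle_cabinet = fixed_structure[0][0][i][0][3]
--         arm_extension = fixed_structure[0][0][i][0][4]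
--         loaded = fixed_structure[0][0][i][0][5]
--         result_string_pos += f"{pos_basex}/{pos_basey}|"
--         result_string_base +=f"  {angle_base}  |"
--         result_string_cabin +=f"  {angle_cabinet}  |"
--         result_string_extension +=f"  {arm_extension}  |"
--         result_string_loaded +="{:^5d}".format(loaded) + '|'
--     return f"{result_string_pos}\n{result_string_base}\n{result_string_cabin}\n{result_string_extension}\n{result_string_loaded}|"
-- ===== SOURCE B (Python) =====
-- def convert_to_string_agent_state(fixed_structure):
--     cells = []
--     for row in fixed_structure[0][0]:
--         s = row[0]
--         cells.append([
--             f"{s[0]}/{s[1]}|",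
--             f"  {s[2]}  |",
--             f"  {s[3]}  |",
--             f"  {s[4]}  |",
--             "{:^5d}".format(s[5]) + '|',
--         ])
--     lines = [''.join(col) for col in zip(*cells)] if cells else [''] * 5
--     return '\n'.join(lines) + '|'
-- ===== Notes on version B (the rewrite author's own statement) =====
-- stated objective: alternative
-- what changed: A's single fused loop over five growing string accumulators is replaced by building a row-major matrix of formatted cells (one five-cell row per agent), transposing it with zip(*cells), and joining each transposed line.
import Mathlib
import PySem

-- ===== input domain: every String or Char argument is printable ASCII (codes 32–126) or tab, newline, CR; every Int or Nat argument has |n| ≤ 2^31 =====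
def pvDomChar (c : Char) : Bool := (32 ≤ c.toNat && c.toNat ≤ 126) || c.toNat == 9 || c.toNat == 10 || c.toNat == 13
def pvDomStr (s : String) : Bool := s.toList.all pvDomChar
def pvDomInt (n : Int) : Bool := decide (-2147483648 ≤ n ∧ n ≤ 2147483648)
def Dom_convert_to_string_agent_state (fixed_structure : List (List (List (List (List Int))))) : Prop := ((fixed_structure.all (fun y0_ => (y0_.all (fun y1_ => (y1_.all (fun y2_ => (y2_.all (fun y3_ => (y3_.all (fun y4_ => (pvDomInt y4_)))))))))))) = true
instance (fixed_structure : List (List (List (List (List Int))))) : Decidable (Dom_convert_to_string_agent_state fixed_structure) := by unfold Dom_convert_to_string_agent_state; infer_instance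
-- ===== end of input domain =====

-- B replaces A's fused five-accumulator loop by building a per-agent matrix of formatted
-- cells and TRANSPOSING it into lines ('alternative'): same return value on Pre_.

-- "{:^5d}".format(n): center str(n) in width 5, extra padding on the right (exact for width 5)
def pvCenter5 (n : Int) : List Char :=
  let s := PySem.Int.toChars n
  if s.length ≥ 5 then s
  else
    let pad := 5 - s.length
    List.replicate (pad / 2) ' ' ++ s ++ List.replicate (pad - pad / 2) ' '

-- ===== PORT A =====
-- A's loop: fold over range(len(fixed_structure[0][0])) carrying five string accumulators
-- (strings are kept as List Char and packed with String.ofList at the end; out-of-range indexing is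
-- defaulted with getD — those inputs raise in Python and are excluded by Pre_).
def convert_to_string_agent_state (fixed_structure : List (List (List (List (List Int))))) : String :=
  let g := PySem.List.pyGetD (PySem.List.pyGetD fixed_structure 0 []) 0 []
  let st := (PySem.List.pyRange 0 (PySem.List.len g) 1).foldl
    (fun (acc : List Char × List Char × List Char × List Char × List Char) i =>
      let s := PySem.List.pyGetD (PySem.List.pyGetD g i []) 0 []
      let pos_basex := PySem.List.pyGetD s 0 0
      let pos_basey := PySem.List.pyGetD s 1 0
      let angle_base := PySem.List.pyGetD s 2 0
      let angle_cabinet := PySem.List.pyGetD s 3 0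
      let arm_extension := PySem.List.pyGetD s 4 0
      let loaded := PySem.List.pyGetD s 5 0
      (acc.1 ++ PySem.Int.toChars pos_basex ++ ['/'] ++ PySem.Int.toChars pos_basey ++ ['|'],
       acc.2.1 ++ [' ', ' '] ++ PySem.Int.toChars angle_base ++ [' ', ' ', '|'],
       acc.2.2.1 ++ [' ', ' '] ++ PySem.Int.toChars angle_cabinet ++ [' ', ' ', '|'],
       acc.2.2.2.1 ++ [' ', ' '] ++ PySem.Int.toChars arm_extension ++ [' ', ' ', '|'],
       acc.2.2.2.2 ++ pvCenter5 loaded ++ ['|']))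
    ([], [], [], [], [])
  String.ofList (st.1 ++ ['\n'] ++ st.2.1 ++ ['\n'] ++ st.2.2.1 ++ ['\n'] ++ st.2.2.2.1 ++ ['\n'] ++ st.2.2.2.2 ++ ['|'])

-- ===== PORT B =====
-- zip(*cells): recursive transpose via zipWith cons; exact for zip's semantics
-- (columns truncate at the shortest row; here every row has exactly five cells).
def pvZipT (cells : List (List (List Char))) : List (List (List Char)) :=
  match cells with
  | [] => []
  | r :: rs =>
    match rs with
    | [] => r.map (fun c => [c])
    | _ :: _ => List.zipWith (fun c col => c :: col) r (pvZipT rs)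

-- B: one row of five formatted cells per agent (appended by the loop, as in Source B),
-- then zip(*cells) (ported as pvZipT above) and joins.
def convert_to_string_agent_state_alt (fixed_structure : List (List (List (List (List Int))))) : String :=
  let cells := (PySem.List.pyGetD (PySem.List.pyGetD fixed_structure 0 []) 0 []).foldl
    (fun (acc : List (List (List Char))) row =>
      let s := PySem.List.pyGetD row 0 []
      acc ++ [[PySem.Int.toChars (PySem.List.pyGetD s 0 0) ++ ['/'] ++ PySem.Int.toChars (PySem.List.pyGetD s 1 0) ++ ['|'],
               [' ', ' '] ++ PySem.Int.toChars (PySem.List.pyGetD s 2 0) ++ [' ', ' ', '|'],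
               [' ', ' '] ++ PySem.Int.toChars (PySem.List.pyGetD s 3 0) ++ [' ', ' ', '|'],
               [' ', ' '] ++ PySem.Int.toChars (PySem.List.pyGetD s 4 0) ++ [' ', ' ', '|'],
               pvCenter5 (PySem.List.pyGetD s 5 0) ++ ['|']]]) []
  let lines := if cells = [] then List.replicate 5 [] else (pvZipT cells).map List.flatten
  String.ofList (List.intercalate ['\n'] lines ++ ['|'])

-- ===== PRECONDITION & SPEC =====
-- Pre_ excludes exactly the inputs on which Python A raises IndexError: a missing
-- fixed_structure[0] or [0][0], an empty agent row, or a state vector shorter than 6.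
def Pre_convert_to_string_agent_state (fixed_structure : List (List (List (List (List Int))))) : Prop :=
  fixed_structure ≠ [] ∧ fixed_structure.headI ≠ [] ∧
    ∀ row ∈ fixed_structure.headI.headI, row ≠ [] ∧ 6 ≤ row.headI.length
instance (fixed_structure : List (List (List (List (List Int))))) : Decidable (Pre_convert_to_string_agent_state fixed_structure) := by unfold Pre_convert_to_string_agent_state; infer_instance

def pvWitness_convert_to_string_agent_state : List (List (List (List (List Int)))) :=
  [[[[[1, 2, 3, 4, 5, 6]]]]]

def Spec_convert_to_string_agent_state (fixed_structure : List (List (List (List (List Int))))) (out : String) : Prop := out = convert_to_string_agent_state_alt fixed_structure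
instance (fixed_structure : List (List (List (List (List Int))))) (out : String) : Decidable (Spec_convert_to_string_agent_state fixed_structure out) := by unfold Spec_convert_to_string_agent_state; infer_instance

-- ===== CLAIM (what is proved, stated in full; the proofs are below) =====
def Claim_equal_convert_to_string_agent_state : Prop := ∀ (fixed_structure : List (List (List (List (List Int))))), Dom_convert_to_string_agent_state fixed_structure → Pre_convert_to_string_agent_state fixed_structure → Spec_convert_to_string_agent_state fixed_structure (convert_to_string_agent_state fixed_structure)

-- ===== LEMMAS AND PROOFS =====

-- A's fused fold over g equals the five independent column concatenations, for any initial accumulators.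
theorem pv_fold_eq (g : List (List (List Int)))
    (a b c d e : List Char) :
    g.foldl
      (fun (acc : List Char × List Char × List Char × List Char × List Char) row =>
        let s := PySem.List.pyGetD row 0 []
        (acc.1 ++ PySem.Int.toChars (PySem.List.pyGetD s 0 0) ++ ['/'] ++ PySem.Int.toChars (PySem.List.pyGetD s 1 0) ++ ['|'],
         acc.2.1 ++ [' ', ' '] ++ PySem.Int.toChars (PySem.List.pyGetD s 2 0) ++ [' ', ' ', '|'],
         acc.2.2.1 ++ [' ', ' '] ++ PySem.Int.toChars (PySem.List.pyGetD s 3 0) ++ [' ', ' ', '|'],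
         acc.2.2.2.1 ++ [' ', ' '] ++ PySem.Int.toChars (PySem.List.pyGetD s 4 0) ++ [' ', ' ', '|'],
         acc.2.2.2.2 ++ pvCenter5 (PySem.List.pyGetD s 5 0) ++ ['|']))
      (a, b, c, d, e)
    = (a ++ (g.map (fun row => let s := PySem.List.pyGetD row 0 [];
          PySem.Int.toChars (PySem.List.pyGetD s 0 0) ++ ['/'] ++ PySem.Int.toChars (PySem.List.pyGetD s 1 0) ++ ['|'])).flatten,
       b ++ (g.map (fun row => let s := PySem.List.pyGetD row 0 [];
          [' ', ' '] ++ PySem.Int.toChars (PySem.List.pyGetD s 2 0) ++ [' ', ' ', '|'])).flatten,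
       c ++ (g.map (fun row => let s := PySem.List.pyGetD row 0 [];
          [' ', ' '] ++ PySem.Int.toChars (PySem.List.pyGetD s 3 0) ++ [' ', ' ', '|'])).flatten,
       d ++ (g.map (fun row => let s := PySem.List.pyGetD row 0 [];
          [' ', ' '] ++ PySem.Int.toChars (PySem.List.pyGetD s 4 0) ++ [' ', ' ', '|'])).flatten,
       e ++ (g.map (fun row => let s := PySem.List.pyGetD row 0 [];
          pvCenter5 (PySem.List.pyGetD s 5 0) ++ ['|'])).flatten) := by
  induction g generalizing a b c d e with
  | nil => simp
  | cons row t ih =>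
      simp only [List.foldl_cons, List.map_cons, List.flatten_cons, ih]
      simp [List.append_assoc]

-- B's cells-building loop is append-accumulation, i.e. a map.
theorem pv_cells_eq {α β : Type} (g : List α) (f : α → β) (a : List β) :
    g.foldl (fun acc x => acc ++ [f x]) a = a ++ g.map f := by
  induction g generalizing a with
  | nil => simp
  | cons x t ih => simp [ih]

-- transpose of a map to 5-cell rows = the five columns (nonempty case).
theorem pv_transpose_map5 {α : Type} (x : α) (g : List α)
    (f0 f1 f2 f3 f4 : α → List Char) :
    pvZipT ([f0 x, f1 x, f2 x, f3 x, f4 x] :: g.map (fun s => [f0 s, f1 s, f2 s, f3 s, f4 s]))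
    = [f0 x :: g.map f0, f1 x :: g.map f1, f2 x :: g.map f2, f3 x :: g.map f3, f4 x :: g.map f4] := by
  induction g generalizing x with
  | nil => rfl
  | cons y t ih =>
      simp only [List.map_cons]
      rw [pvZipT]
      rw [ih y]
      rfl

-- ===== VERDICT (by name: the statement is the Claim_ definition above) =====
theorem convert_to_string_agent_state_spec : Claim_equal_convert_to_string_agent_state := by
  intro fs _ _
  unfold Spec_convert_to_string_agent_state convert_to_string_agent_state convert_to_string_agent_state_alt
  dsimp only
  rw [PySem.List.foldl_pyRange_zero_pyGetD (PySem.List.pyGetD (PySem.List.pyGetD fs 0 []) 0 [])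
        ([] : List (List Int))
        (fun (acc : List Char × List Char × List Char × List Char × List Char) row =>
          let s := PySem.List.pyGetD row 0 []
          (acc.1 ++ PySem.Int.toChars (PySem.List.pyGetD s 0 0) ++ ['/'] ++ PySem.Int.toChars (PySem.List.pyGetD s 1 0) ++ ['|'],
           acc.2.1 ++ [' ', ' '] ++ PySem.Int.toChars (PySem.List.pyGetD s 2 0) ++ [' ', ' ', '|'],
           acc.2.2.1 ++ [' ', ' '] ++ PySem.Int.toChars (PySem.List.pyGetD s 3 0) ++ [' ', ' ', '|'],
           acc.2.2.2.1 ++ [' ', ' '] ++ PySem.Int.toChars (PySem.List.pyGetD s 4 0) ++ [' ', ' ', '|'],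
           acc.2.2.2.2 ++ pvCenter5 (PySem.List.pyGetD s 5 0) ++ ['|']))
        ([], [], [], [], []),
      pv_fold_eq, pv_cells_eq]
  cases hg : PySem.List.pyGetD (PySem.List.pyGetD fs 0 []) 0 [] with
  | nil => rfl
  | cons x t =>
      have h := pv_transpose_map5 x t
        (fun row => PySem.Int.toChars (PySem.List.pyGetD (PySem.List.pyGetD row 0 []) 0 0) ++ ['/'] ++ PySem.Int.toChars (PySem.List.pyGetD (PySem.List.pyGetD row 0 []) 1 0) ++ ['|'])
        (fun row => [' ', ' '] ++ PySem.Int.toChars (PySem.List.pyGetD (PySem.List.pyGetD row 0 []) 2 0) ++ [' ', ' ', '|'])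
        (fun row => [' ', ' '] ++ PySem.Int.toChars (PySem.List.pyGetD (PySem.List.pyGetD row 0 []) 3 0) ++ [' ', ' ', '|'])
        (fun row => [' ', ' '] ++ PySem.Int.toChars (PySem.List.pyGetD (PySem.List.pyGetD row 0 []) 4 0) ++ [' ', ' ', '|'])
        (fun row => pvCenter5 (PySem.List.pyGetD (PySem.List.pyGetD row 0 []) 5 0) ++ ['|'])
      simp only [List.nil_append, List.map_cons] at h ⊢
      rw [h]
      simp [List.intercalate, List.intersperse, List.append_assoc]
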